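-- pv_equiv track=rewrite | github.com/Aasthaengg/IBMdataset | Python_codes/p03815/s830740498.py | calc
-- ===== SOURCE A (Python) =====
-- def calc(n):
--   if n == 0:
--     return 0
--   elif n < 7:
--     return 1
--   elif n < 12:
--     return 2
--   else:
--     return (n // 11)*2 + calc(n % 11)
-- ===== SOURCE B (Python) =====
-- def calc(n):
--   if n == 0:
--     return 0
--   elif n < 7:
--     return 1
--   elif n < 12:
--     return 2
--   q, r = divmod(n, 11)
--   return 2*q + (0 if r == 0 else 1 if r < 7 else 2)
-- ===== Notes on version B (the rewrite author's own statement) =====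
-- stated objective: simpler
-- what changed: The one-level recursive else-branch is replaced by a non-recursive closed form: divmod(n, 11) and an inlined base-case value of the remainder.
import Mathlib
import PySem

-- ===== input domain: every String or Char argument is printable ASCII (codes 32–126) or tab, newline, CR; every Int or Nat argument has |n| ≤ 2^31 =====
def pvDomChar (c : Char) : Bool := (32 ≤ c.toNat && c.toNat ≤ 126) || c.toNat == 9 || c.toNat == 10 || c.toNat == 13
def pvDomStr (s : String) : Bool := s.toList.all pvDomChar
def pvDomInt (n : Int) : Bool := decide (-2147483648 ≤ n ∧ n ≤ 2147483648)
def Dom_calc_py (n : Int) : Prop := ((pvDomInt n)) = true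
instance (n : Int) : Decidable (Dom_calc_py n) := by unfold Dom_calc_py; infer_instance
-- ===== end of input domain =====

-- B replaces the single recursive call by the inlined base-case of divmod(n, 11): simpler, no recursion.

-- ===== PORT A =====
def calc_py (n : Int) : Int :=
  if n == 0 then 0
  else if n < 7 then 1
  else if n < 12 then 2
  else (PySem.Int.floordiv n 11) * 2 + calc_py (PySem.Int.mod n 11)
termination_by n.toNat
decreasing_by
  rename_i h0 h7 h12
  simp only [beq_iff_eq] at h0
  rw [PySem.Int.mod_eq_emod_of_pos (by omega)]
  have h1 : 0 ≤ n % 11 := Int.emod_nonneg n (by omega)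
  have h2 : n % 11 < 11 := Int.emod_lt_of_pos n (by omega)
  omega

-- ===== PORT B =====
def calc_py_alt (n : Int) : Int :=
  if n == 0 then 0
  else if n < 7 then 1
  else if n < 12 then 2
  else
    let q := PySem.Int.floordiv n 11
    let r := PySem.Int.mod n 11
    2 * q + (if r == 0 then 0 else if r < 7 then 1 else 2)

-- ===== PRECONDITION & SPEC =====
def Spec_calc_py (n : Int) (out : Int) : Prop := out = calc_py_alt n
instance (n : Int) (out : Int) : Decidable (Spec_calc_py n out) := by unfold Spec_calc_py; infer_instance

-- ===== CLAIM (what is proved, stated in full; the proofs are below) =====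
def Claim_equal_calc_py : Prop := ∀ (n : Int), Dom_calc_py n → Spec_calc_py n (calc_py n)

-- ===== LEMMAS AND PROOFS =====

-- the base cases of A on a remainder 0 ≤ r < 11
lemma calc_py_small (r : Int) (h0 : 0 ≤ r) (h : r < 11) :
    calc_py r = (if r == 0 then 0 else if r < 7 then 1 else 2) := by
  unfold calc_py
  by_cases hz : r = 0
  · simp [hz]
  · by_cases h7 : r < 7
    · simp [hz, h7]
    · simp [hz, h7, show r < 12 by omega]

-- ===== VERDICT (by name: the statement is the Claim_ definition above) =====
theorem calc_py_spec : Claim_equal_calc_py := by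
  intro n _
  unfold Spec_calc_py calc_py_alt
  by_cases h0 : n = 0
  · unfold calc_py; simp [h0]
  · by_cases h7 : n < 7
    · unfold calc_py; simp [h0, h7]
    · by_cases h12 : n < 12
      · unfold calc_py; simp [h0, h7, h12]
      · rw [calc_py]
        have hmod := PySem.Int.mod_eq_emod_of_pos (a := n) (b := 11) (by omega)
        have h1 : 0 ≤ n % 11 := Int.emod_nonneg n (by omega)
        have h2 : n % 11 < 11 := Int.emod_lt_of_pos n (by omega)
        simp only [h0, h7, h12, if_neg, beq_iff_eq, if_false]
        rw [hmod, calc_py_small _ h1 h2]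
        simp only [← hmod, beq_iff_eq]
        ring
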